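-- pv_equiv track=rewrite | github.com/MrQvic/GPT-NER | cnec2.0/data/html/parser/combined_parser.py | get_word_positions
-- ===== SOURCE A (Python) =====
-- def get_word_positions(text):
--     positions = {}  # {word: [positions in order]}
--     word_counts = {}  # Track current count of each word
--     words = text.split()
--
--     # Store each word's positions in order
--     for i, word in enumerate(words):
--         if word not in positions:
--             positions[word] = []
--             word_counts[word] = 0
--         positions[word].append(i)
--         word_counts[word] += 1
--
--     return positions, words, word_counts
-- ===== SOURCE B (Python) =====
-- def get_word_positions(text):
--     words = text.split()
--     order = list(dict.fromkeys(words))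
--     positions = {w: [i for i, x in enumerate(words) if x == w] for w in order}
--     word_counts = {w: words.count(w) for w in order}
--     return positions, words, word_counts
-- ===== Notes on version B (the rewrite author's own statement) =====
-- stated objective: alternative
-- what changed: B first computes the distinct words in first-appearance order (dict.fromkeys), then builds positions and counts by a separate scan of the word list per distinct word (comprehension filter / list.count), instead of A's single pass that grows both dicts incrementally.
import Mathlib
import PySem

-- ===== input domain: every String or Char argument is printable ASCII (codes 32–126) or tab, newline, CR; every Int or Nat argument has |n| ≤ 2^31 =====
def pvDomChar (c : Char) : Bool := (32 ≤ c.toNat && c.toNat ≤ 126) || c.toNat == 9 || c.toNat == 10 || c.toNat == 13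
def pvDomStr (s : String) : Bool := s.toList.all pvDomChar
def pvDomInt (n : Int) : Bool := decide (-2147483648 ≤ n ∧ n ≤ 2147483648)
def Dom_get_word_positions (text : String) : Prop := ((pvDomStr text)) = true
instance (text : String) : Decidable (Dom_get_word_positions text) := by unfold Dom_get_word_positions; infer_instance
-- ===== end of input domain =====

-- B computes the distinct words first and then derives each word's positions and count by a
-- separate scan per distinct word, instead of A's single incremental pass over two dicts
-- (alternative decomposition; same value, not claimed faster).

-- ===== PORT A =====
def get_word_positions (text : String) : (List (String × List Int)) × List String × (List (String × Int)) :=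
  let words := PySem.Str.split₀ text
  let st := (PySem.List.enumerate words 0).foldl
    (fun (st : PySem.Dict String (List Int) × PySem.Dict String Int) p =>
      let st2 := if st.1.contains p.2 then st else (st.1.insert p.2 [], st.2.insert p.2 0)
      (st2.1.modify p.2 [] (· ++ [p.1]), st2.2.modify p.2 0 (· + 1)))
    (PySem.Dict.empty, PySem.Dict.empty)
  (st.1.items, words, st.2.items)

-- ===== PORT B =====
def get_word_positions_alt (text : String) : (List (String × List Int)) × List String × (List (String × Int)) :=
  let words := PySem.Str.split₀ text
  let order := PySem.List.dedup words          -- list(dict.fromkeys(words))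
  let positions := order.map (fun w =>
    (w, ((PySem.List.enumerate words 0).filter (fun p => p.2 == w)).map (·.1)))
  let word_counts := order.map (fun w => (w, (PySem.List.count words w : Int)))
  (positions, words, word_counts)

-- ===== PRECONDITION & SPEC =====
def Spec_get_word_positions (text : String) (out : (List (String × List Int)) × List String × (List (String × Int))) : Prop := out = get_word_positions_alt text
instance (text : String) (out : (List (String × List Int)) × List String × (List (String × Int))) : Decidable (Spec_get_word_positions text out) := by unfold Spec_get_word_positions; infer_instance

-- ===== CLAIM (what is proved, stated in full; the proofs are below) =====
def Claim_equal_get_word_positions : Prop := ∀ (text : String), Dom_get_word_positions text → Spec_get_word_positions text (get_word_positions text)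

-- ===== LEMMAS AND PROOFS =====

/-- A's one pass over a coupled pair of dicts splits into two independent modify-loops:
    the membership branch collapses because both dicts always hold the same keys. -/
theorem pvSplit (l : List (Int × String))
    (d1 : PySem.Dict String (List Int)) (d2 : PySem.Dict String Int)
    (h : ∀ w, d1.contains w = d2.contains w) :
    l.foldl
      (fun (st : PySem.Dict String (List Int) × PySem.Dict String Int) p =>
        let st2 := if st.1.contains p.2 then st else (st.1.insert p.2 [], st.2.insert p.2 0)
        (st2.1.modify p.2 [] (· ++ [p.1]), st2.2.modify p.2 0 (· + 1)))
      (d1, d2)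
    = (l.foldl (fun d p => d.modify p.2 [] (· ++ [p.1])) d1,
       l.foldl (fun d p => d.modify p.2 0 (· + 1)) d2) := by
  induction l generalizing d1 d2 with
  | nil => rfl
  | cons p rest ih =>
    simp only [List.foldl_cons]
    have h1 : (if d1.contains p.2 then d1 else d1.insert p.2 []).modify p.2 [] (· ++ [p.1])
        = d1.modify p.2 [] (· ++ [p.1]) := by
      by_cases hc : d1.contains p.2
      · simp [hc]
      · rw [if_neg hc]
        show ((d1.insert p.2 []).insert p.2 ((d1.insert p.2 []).getD p.2 [] ++ [p.1]))
            = d1.insert p.2 (d1.getD p.2 [] ++ [p.1])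
        rw [PySem.Dict.getD_insert_self, PySem.Dict.insert_insert_self,
          PySem.Dict.getD_of_not_contains _ _ (by simpa using hc)]
    have h2 : (if d1.contains p.2 then d2 else d2.insert p.2 0).modify p.2 0 (· + 1)
        = d2.modify p.2 0 (· + 1) := by
      by_cases hc : d1.contains p.2
      · simp [hc]
      · rw [if_neg hc]
        show ((d2.insert p.2 0).insert p.2 (((d2.insert p.2 0).getD p.2 0) + 1))
            = d2.insert p.2 (d2.getD p.2 0 + 1)
        rw [PySem.Dict.getD_insert_self, PySem.Dict.insert_insert_self,
          PySem.Dict.getD_of_not_contains _ _ (by rw [← h]; simpa using hc)]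
    have hstep :
        (let st2 := if d1.contains p.2 then (d1, d2) else (d1.insert p.2 [], d2.insert p.2 0)
         (st2.1.modify p.2 [] (· ++ [p.1]), st2.2.modify p.2 0 (· + 1)))
        = (d1.modify p.2 [] (· ++ [p.1]), d2.modify p.2 0 (· + 1)) := by
      by_cases hc : d1.contains p.2
      · simp [hc]
      · simp only [hc, Bool.false_eq_true, if_false] at h1 h2 ⊢
        rw [h1, h2]
    rw [hstep]
    exact ih _ _ (fun w => by
      rw [PySem.Dict.contains_modify, PySem.Dict.contains_modify, h])

/-- the positions dict A builds, characterised: items = per-distinct-word filtered index lists. -/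
theorem pvPosItems (words : List String) :
    ((PySem.List.enumerate words 0).foldl
        (fun (d : PySem.Dict String (List Int)) p => d.modify p.2 [] (· ++ [p.1]))
        PySem.Dict.empty).items
    = (PySem.List.dedup words).map (fun w =>
        (w, ((PySem.List.enumerate words 0).filter (fun p => p.2 == w)).map (·.1))) := by
  have hswap : (PySem.List.enumerate words 0).foldl
        (fun (d : PySem.Dict String (List Int)) p => d.modify p.2 [] (· ++ [p.1]))
        PySem.Dict.empty
      = ((PySem.List.enumerate words 0).map Prod.swap).foldl
        (fun (d : PySem.Dict String (List Int)) p => d.modify p.1 [] (· ++ [p.2]))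
        PySem.Dict.empty := by
    rw [List.foldl_map]
    simp only [Prod.fst_swap, Prod.snd_swap]
  have hkeys : (((PySem.List.enumerate words 0).map Prod.swap).foldl
        (fun (d : PySem.Dict String (List Int)) p => d.modify p.1 [] (· ++ [p.2]))
        PySem.Dict.empty).keys = PySem.List.dedup words := by
    rw [PySem.Dict.keys_foldl_modify_key]
    have hm : (Prod.fst ∘ (Prod.swap : Int × String → String × Int)) = (·.2) := by
      funext p; simp
    simp only [PySem.Set.update, PySem.Set.ofList_eq_foldl, PySem.Dict.keys_empty,
      PySem.List.dedup_eq_ofList, List.map_map, hm, PySem.List.map_snd_enumerate]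
  have hnodup := PySem.Dict.nodup_keys_foldl_modify_key
    ((PySem.List.enumerate words 0).map Prod.swap) Prod.fst ([] : List Int)
    (fun (d : PySem.Dict String (List Int)) p => (· ++ [p.2]))
    PySem.Dict.empty (by simp [PySem.Dict.keys_empty])
  rw [hswap, PySem.Dict.items_eq_map_keys _ ?hn ([] : List Int)]
  case hn =>
    have := hnodup
    simpa using this
  rw [hkeys]
  apply List.map_congr_left
  intro w _
  congr 1
  rw [PySem.Dict.getD_foldl_modify_append, PySem.Dict.getD_empty, List.nil_append,
    List.filter_map, List.map_map]
  congr 1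

/-- the counts dict A builds IS Counter(words). -/
theorem pvCntItems (words : List String) :
    ((PySem.List.enumerate words 0).foldl
        (fun (d : PySem.Dict String Int) p => d.modify p.2 0 (· + 1))
        PySem.Dict.empty).items
    = (PySem.List.dedup words).map (fun w => (w, (PySem.List.count words w : Int))) := by
  have h : (PySem.List.enumerate words 0).foldl
        (fun (d : PySem.Dict String Int) p => d.modify p.2 0 (· + 1)) PySem.Dict.empty
      = PySem.Dict.counter words := by
    rw [PySem.Dict.counter_eq_foldl]
    conv_rhs => rw [← PySem.List.map_snd_enumerate words 0]
    rw [List.foldl_map]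
  rw [h, PySem.Dict.items_counter]
  simp [PySem.List.dedup_eq_ofList, PySem.List.count_eq]

-- ===== VERDICT (by name: the statement is the Claim_ definition above) =====
theorem get_word_positions_spec : Claim_equal_get_word_positions := by
  intro text _
  show get_word_positions text = get_word_positions_alt text
  simp only [get_word_positions, get_word_positions_alt]
  rw [pvSplit _ _ _ (fun w => rfl)]
  exact Prod.ext (pvPosItems _) (Prod.ext rfl (pvCntItems _))
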